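-- pv_equiv track=rewrite | github.com/lengthwisehems/retail2 | fidelity_inventory.py | determine_inseam_style
-- ===== SOURCE A (Python) =====
-- from typing import Any, Dict, Iterable, List, Optional, Tuple
--
-- def determine_inseam_style(tags: Iterable[str]) -> str:
--     tags_lower = [tag.lower() for tag in tags]
--     if any(term in tag for tag in tags_lower for term in ("length:ankle", "filterwomenankle", "ankle")):
--         return "Ankle"
--     if any(term in tag for tag in tags_lower for term in ("length:crop", "filterwomencropped", "crop", "cropped")):
--         return "Cropped"
--     if any(term in tag for tag in tags_lower for term in ("length:capri", "length:knee", "capri")):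
--         return "Capri"
--     return ""
-- ===== SOURCE B (Python) =====
-- ANKLE_TERMS = ("length:ankle", "filterwomenankle", "ankle")
-- CROP_TERMS = ("length:crop", "filterwomencropped", "crop", "cropped")
-- CAPRI_TERMS = ("length:capri", "length:knee", "capri")
--
-- def determine_inseam_style(tags):
--     has_ankle = has_crop = has_capri = False
--     for tag in tags:
--         t = tag.lower()
--         has_ankle = has_ankle or any(term in t for term in ANKLE_TERMS)
--         has_crop = has_crop or any(term in t for term in CROP_TERMS)
--         has_capri = has_capri or any(term in t for term in CAPRI_TERMS)
--     if has_ankle: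
--         return "Ankle"
--     if has_crop:
--         return "Cropped"
--     if has_capri:
--         return "Capri"
--     return ""
-- ===== Notes on version B (the rewrite author's own statement) =====
-- stated objective: alternative
-- what changed: Replaced A's three sequential early-returning scans over the lowercased tag list with one single pass over the tags that lowercases each tag once and accumulates three category flags, deciding the result after the loop in the same priority order.
import Mathlib
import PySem

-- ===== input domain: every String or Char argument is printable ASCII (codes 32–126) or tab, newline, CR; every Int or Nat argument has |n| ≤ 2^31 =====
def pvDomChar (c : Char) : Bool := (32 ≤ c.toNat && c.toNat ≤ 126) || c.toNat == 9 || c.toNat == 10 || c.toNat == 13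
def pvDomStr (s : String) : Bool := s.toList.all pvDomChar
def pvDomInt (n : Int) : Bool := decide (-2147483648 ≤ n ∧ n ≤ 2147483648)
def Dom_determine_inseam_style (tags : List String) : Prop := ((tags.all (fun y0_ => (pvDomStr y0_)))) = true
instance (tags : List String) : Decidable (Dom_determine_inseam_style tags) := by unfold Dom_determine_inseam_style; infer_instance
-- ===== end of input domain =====

-- B replaces A's three sequential scans by one pass accumulating three match flags (same terms, same priority); alternative decomposition, exact equivalence.


-- ===== PORT A =====
def determine_inseam_style (tags : List String) : String :=
  let tags_lower := tags.map PySem.Str.lower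
  if tags_lower.any (fun tag =>
      (["length:ankle", "filterwomenankle", "ankle"] : List String).any
        (fun term => PySem.Str.isIn term tag)) then "Ankle"
  else if tags_lower.any (fun tag =>
      (["length:crop", "filterwomencropped", "crop", "cropped"] : List String).any
        (fun term => PySem.Str.isIn term tag)) then "Cropped"
  else if tags_lower.any (fun tag =>
      (["length:capri", "length:knee", "capri"] : List String).any
        (fun term => PySem.Str.isIn term tag)) then "Capri"
  else ""

-- ===== PORT B =====
def pvAnkleTerms : List String := ["length:ankle", "filterwomenankle", "ankle"]
def pvCropTerms : List String := ["length:crop", "filterwomencropped", "crop", "cropped"]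
def pvCapriTerms : List String := ["length:capri", "length:knee", "capri"]

def determine_inseam_style_alt (tags : List String) : String :=
  let flags := tags.foldl
    (fun (st : Bool × Bool × Bool) tag =>
      let t := PySem.Str.lower tag
      (st.1 || pvAnkleTerms.any (fun term => PySem.Str.isIn term t),
       st.2.1 || pvCropTerms.any (fun term => PySem.Str.isIn term t),
       st.2.2 || pvCapriTerms.any (fun term => PySem.Str.isIn term t)))
    (false, false, false)
  if flags.1 then "Ankle"
  else if flags.2.1 then "Cropped"
  else if flags.2.2 then "Capri"
  else ""

-- ===== PRECONDITION & SPEC =====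
def Spec_determine_inseam_style (tags : List String) (out : String) : Prop := out = determine_inseam_style_alt tags
instance (tags : List String) (out : String) : Decidable (Spec_determine_inseam_style tags out) := by unfold Spec_determine_inseam_style; infer_instance

-- ===== CLAIM (what is proved, stated in full; the proofs are below) =====
def Claim_equal_determine_inseam_style : Prop := ∀ (tags : List String), Dom_determine_inseam_style tags → Spec_determine_inseam_style tags (determine_inseam_style tags)

-- ===== LEMMAS AND PROOFS =====

-- The foldl of B computes exactly the three 'any' flags, or-ed onto the accumulator.
theorem pv_foldl_flags (tags : List String) (a b c : Bool) :
    tags.foldl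
      (fun (st : Bool × Bool × Bool) tag =>
        let t := PySem.Str.lower tag
        (st.1 || pvAnkleTerms.any (fun term => PySem.Str.isIn term t),
         st.2.1 || pvCropTerms.any (fun term => PySem.Str.isIn term t),
         st.2.2 || pvCapriTerms.any (fun term => PySem.Str.isIn term t)))
      (a, b, c)
    = (a || tags.any (fun tag => pvAnkleTerms.any (fun term => PySem.Str.isIn term (PySem.Str.lower tag))),
       b || tags.any (fun tag => pvCropTerms.any (fun term => PySem.Str.isIn term (PySem.Str.lower tag))),
       c || tags.any (fun tag => pvCapriTerms.any (fun term => PySem.Str.isIn term (PySem.Str.lower tag)))) := by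
  induction tags generalizing a b c with
  | nil => simp
  | cons hd tl ih =>
    simp only [List.foldl_cons]
    rw [ih]
    simp [Bool.or_assoc]

-- ===== VERDICT (by name: the statement is the Claim_ definition above) =====
theorem determine_inseam_style_spec : Claim_equal_determine_inseam_style := by
  intro tags _
  unfold Spec_determine_inseam_style determine_inseam_style determine_inseam_style_alt
  rw [pv_foldl_flags]
  simp [List.any_map, pvAnkleTerms, pvCropTerms, pvCapriTerms, Function.comp]
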